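-- pv_equiv track=rewrite | github.com/Daviccii/Intelligent-Airport-checkin-system | backend/app.py | autoassign_seat_from_capacity
-- ===== SOURCE A (Python) =====
-- def autoassign_seat_from_capacity(capacity, existing_seats=None, blocked_seats=None, preference='any', cols=None):
--     """Deterministic seat auto-assignment helper.
--     - capacity: int number of seats
--     - existing_seats: iterable of seat labels already taken (strings)
--     - blocked_seats: iterable of seat labels blocked/unavailable
--     - preference: 'window'|'aisle'|'middle'|'any'
--     - cols: optional list of column letters (defaults to 6-abreast A-F)
--
--     Returns a seat label string (e.g. '1A') or None if no seats available.
--     """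
--     try:
--         cap = int(capacity)
--     except Exception:
--         return None
--     if cap <= 0:
--         return None
--
--     if existing_seats is None:
--         existing = set()
--     else:
--         existing = set(str(s) for s in existing_seats if s)
--     blocked = set(str(s) for s in (blocked_seats or []) if s)
--
--     if cols is None:
--         cols = ['A', 'B', 'C', 'D', 'E', 'F']
--
--     labels = []
--     rows = (cap + len(cols) - 1) // len(cols)
--     count = 0
--     for r in range(1, rows + 1):
--         for c in cols:
--             count += 1
--             if count > cap:
--                 break
--             labels.append({'label': f"{r}{c}", 'row': r, 'col': c})
--
--     def seat_type(col):
--         if col in ('A', 'F'):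
--             return 'window'
--         if col in ('C', 'D'):
--             return 'aisle'
--         return 'middle'
--
--     pref = (preference or 'any').lower()
--     candidates = [s['label'] for s in labels if s['label'] not in existing and s['label'] not in blocked and (pref == 'any' or seat_type(s['col']) == pref)]
--     if not candidates:
--         candidates = [s['label'] for s in labels if s['label'] not in existing and s['label'] not in blocked]
--     if not candidates:
--         return None
--     return candidates[0]
-- ===== SOURCE B (Python) =====
-- def autoassign_seat_from_capacity(capacity, existing_seats=None, blocked_seats=None, preference='any', cols=None):
--     """Single row-major pass tracking the first preferred and first available seat."""
--     try:
--         cap = int(capacity)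
--     except Exception:
--         return None
--     if cap <= 0:
--         return None
--     taken = set(str(s) for s in (existing_seats or []) if s) | set(str(s) for s in (blocked_seats or []) if s)
--     if cols is None:
--         cols = ['A', 'B', 'C', 'D', 'E', 'F']
--     n = len(cols)
--     pref = (preference or 'any').lower()
--     first_any = None
--     for i in range(cap):
--         r, j = divmod(i, n)
--         c = cols[j]
--         lab = f"{r + 1}{c}"
--         if lab in taken:
--             continue
--         if first_any is None:
--             first_any = lab
--         t = 'window' if c in ('A', 'F') else 'aisle' if c in ('C', 'D') else 'middle'
--         if pref == 'any' or t == pref: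
--             return lab
--     return first_any
-- ===== Notes on version B (the rewrite author's own statement) =====
-- stated objective: simpler
-- what changed: A materialises the full list of seat-label dicts with a nested row/column loop and then runs two separate filtering passes (preference-matching candidates, then an any-available fallback); B does a single row-major pass over seat indices, computing each label on the fly via divmod, remembering the first available seat and returning immediately at the first preference match.
import Mathlib
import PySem

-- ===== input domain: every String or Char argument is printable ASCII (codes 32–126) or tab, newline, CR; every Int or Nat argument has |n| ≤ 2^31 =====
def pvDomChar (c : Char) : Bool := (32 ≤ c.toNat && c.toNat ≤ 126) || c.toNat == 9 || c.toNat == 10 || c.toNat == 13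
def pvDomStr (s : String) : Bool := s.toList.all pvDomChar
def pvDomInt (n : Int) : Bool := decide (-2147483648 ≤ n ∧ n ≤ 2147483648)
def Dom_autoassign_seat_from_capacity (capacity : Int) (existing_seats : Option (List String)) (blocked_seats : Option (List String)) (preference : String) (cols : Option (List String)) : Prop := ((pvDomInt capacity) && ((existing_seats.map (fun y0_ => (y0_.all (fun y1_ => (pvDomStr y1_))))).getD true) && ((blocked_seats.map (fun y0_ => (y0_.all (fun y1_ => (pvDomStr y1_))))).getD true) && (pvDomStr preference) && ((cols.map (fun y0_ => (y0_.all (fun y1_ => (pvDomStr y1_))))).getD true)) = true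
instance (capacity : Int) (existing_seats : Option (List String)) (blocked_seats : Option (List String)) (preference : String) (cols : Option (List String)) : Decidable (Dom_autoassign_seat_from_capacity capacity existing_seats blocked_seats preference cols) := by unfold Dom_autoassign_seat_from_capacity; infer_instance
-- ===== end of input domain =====

-- B replaces A's build-all-labels-then-two-filter-passes structure by a single early-exiting
-- row-major pass that tracks the first available seat (objective: simpler one-pass algorithm).

-- ===== PORT A =====
def pvSeatType (col : String) : String :=
  if col == "A" || col == "F" then "window"
  else if col == "C" || col == "D" then "aisle"
  else "middle"

-- inner 'for c in cols' loop of A, with its 'count > cap' break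
def pvInnerA (cap : Int) (r : Int) : List String → Int × List (String × Int × String) → Int × List (String × Int × String)
  | [], st => st
  | c :: cs, (count, labels) =>
    if count + 1 > cap then (count + 1, labels)
    else pvInnerA cap r cs (count + 1, labels ++ [(PySem.Int.toStr r ++ c, r, c)])

def autoassign_seat_from_capacity (capacity : Int) (existing_seats : Option (List String)) (blocked_seats : Option (List String)) (preference : String) (cols : Option (List String)) : Option String :=
  let cap := capacity
  if cap ≤ 0 then none else
  let existing : PySem.Set String :=
    match existing_seats with
    | none => PySem.Set.empty
    | some l => PySem.Set.ofList (l.filter (fun s => !(s == "")))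
  let blocked : PySem.Set String := PySem.Set.ofList ((blocked_seats.getD []).filter (fun s => !(s == "")))
  let colsL := cols.getD ["A", "B", "C", "D", "E", "F"]
  -- rows = (cap + len(cols) - 1) // len(cols); ZeroDivisionError when cols == [] (excluded by Pre_)
  let rows := PySem.Int.floordiv (cap + (colsL.length : Int) - 1) (colsL.length : Int)
  let st := (PySem.List.pyRange 1 (rows + 1) 1).foldl (fun st r => pvInnerA cap r colsL st) (0, [])
  let labels := st.2
  let pref := PySem.Str.lower (if preference == "" then "any" else preference)
  let candidates := (labels.filter (fun s => !(existing.contains s.1) && !(blocked.contains s.1) && (pref == "any" || pvSeatType s.2.2 == pref))).map (fun s => s.1)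
  let candidates := if candidates.isEmpty then (labels.filter (fun s => !(existing.contains s.1) && !(blocked.contains s.1))).map (fun s => s.1) else candidates
  match candidates with
  | [] => none
  | x :: _ => some x

-- ===== PORT B =====
-- B's single pass over i in range(cap); returns on the first preference match
def pvAltLoop (taken : PySem.Set String) (colsL : List String) (pref : String) : List Int → Option String → Option String
  | [], first_any => first_any
  | i :: rest, first_any =>
    let r := PySem.Int.floordiv i (colsL.length : Int)
    let j := PySem.Int.mod i (colsL.length : Int)
    -- cols[j]: exact, since 0 ≤ j < len(cols) always holds for a divmod remainder
    let c := (PySem.List.pyGet? colsL j).getD ""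
    let lab := PySem.Int.toStr (r + 1) ++ c
    if taken.contains lab then pvAltLoop taken colsL pref rest first_any
    else
      let fa := match first_any with | none => some lab | some x => some x
      let t := if c == "A" || c == "F" then "window" else if c == "C" || c == "D" then "aisle" else "middle"
      if pref == "any" || t == pref then some lab
      else pvAltLoop taken colsL pref rest fa

def autoassign_seat_from_capacity_alt (capacity : Int) (existing_seats : Option (List String)) (blocked_seats : Option (List String)) (preference : String) (cols : Option (List String)) : Option String :=
  let cap := capacity
  if cap ≤ 0 then none else
  let taken : PySem.Set String :=
    PySem.Set.union (PySem.Set.ofList ((existing_seats.getD []).filter (fun s => !(s == ""))))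
                    (PySem.Set.ofList ((blocked_seats.getD []).filter (fun s => !(s == ""))))
  let colsL := cols.getD ["A", "B", "C", "D", "E", "F"]
  let pref := PySem.Str.lower (if preference == "" then "any" else preference)
  pvAltLoop taken colsL pref (PySem.List.pyRange 0 cap 1) none

-- ===== PRECONDITION & SPEC =====
-- Pre_ excludes only cols = some [] with a positive capacity: there Python A raises
-- ZeroDivisionError (rows = … // len(cols)), and Python B raises too (divmod(i, 0)).
def Pre_autoassign_seat_from_capacity (capacity : Int) (existing_seats : Option (List String)) (blocked_seats : Option (List String)) (preference : String) (cols : Option (List String)) : Prop :=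
  capacity ≤ 0 ∨ cols ≠ some ([] : List String)
instance (capacity : Int) (existing_seats : Option (List String)) (blocked_seats : Option (List String)) (preference : String) (cols : Option (List String)) : Decidable (Pre_autoassign_seat_from_capacity capacity existing_seats blocked_seats preference cols) := by unfold Pre_autoassign_seat_from_capacity; infer_instance

def pvWitness_autoassign_seat_from_capacity : Int × Option (List String) × Option (List String) × String × Option (List String) :=
  (3, some ["1A"], none, "window", none)

def Spec_autoassign_seat_from_capacity (capacity : Int) (existing_seats : Option (List String)) (blocked_seats : Option (List String)) (preference : String) (cols : Option (List String)) (out : Option String) : Prop := out = autoassign_seat_from_capacity_alt capacity existing_seats blocked_seats preference cols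
instance (capacity : Int) (existing_seats : Option (List String)) (blocked_seats : Option (List String)) (preference : String) (cols : Option (List String)) (out : Option String) : Decidable (Spec_autoassign_seat_from_capacity capacity existing_seats blocked_seats preference cols out) := by unfold Spec_autoassign_seat_from_capacity; infer_instance

-- ===== CLAIM (what is proved, stated in full; the proofs are below) =====
def Claim_equal_autoassign_seat_from_capacity : Prop := ∀ (capacity : Int) (existing_seats : Option (List String)) (blocked_seats : Option (List String)) (preference : String) (cols : Option (List String)), Dom_autoassign_seat_from_capacity capacity existing_seats blocked_seats preference cols → Pre_autoassign_seat_from_capacity capacity existing_seats blocked_seats preference cols → Spec_autoassign_seat_from_capacity capacity existing_seats blocked_seats preference cols (autoassign_seat_from_capacity capacity existing_seats blocked_seats preference cols)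

-- ===== LEMMAS AND PROOFS =====

-- the i-th generated seat entry (label, row, col), row-major
def pvEnt (r : Int) (c : String) : String × Int × String := (PySem.Int.toStr r ++ c, r, c)
def pvG (colsL : List String) (i : Nat) : String × Int × String :=
  pvEnt (((i / colsL.length : Nat) : Int) + 1) (colsL.getD (i % colsL.length) "")

def pvP1 (taken : PySem.Set String) (pref : String) (s : String × Int × String) : Bool :=
  !(taken.contains s.1) && (pref == "any" || pvSeatType s.2.2 == pref)
def pvP2 (taken : PySem.Set String) (s : String × Int × String) : Bool :=
  !(taken.contains s.1)
def pvPick (o1 fa o2 : Option String) : Option String :=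
  match o1 with
  | some x => some x
  | none => match fa with
    | some x => some x
    | none => o2

theorem pvContains_union {α : Type} [BEq α] [LawfulBEq α] (s t : PySem.Set α) (x : α) :
    PySem.Set.contains (PySem.Set.union s t) x = (PySem.Set.contains s x || PySem.Set.contains t x) := by
  cases h1 : PySem.Set.contains s x <;> cases h2 : PySem.Set.contains t x <;>
    simp_all [PySem.Set.mem_union]

theorem pvInnerA_spec (cap r : Int) : ∀ (cs : List String) (k : Int) (L : List (String × Int × String)), 0 ≤ k → k ≤ cap →
    pvInnerA cap r cs (k, L) =
      ((if k + cs.length ≤ cap then k + cs.length else cap + 1),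
       L ++ ((cs.take (cap - k).toNat).map (fun c => pvEnt r c))) := by
  intro cs
  induction cs with
  | nil => intro k L h0 h1; simp [pvInnerA, h1]
  | cons c cs ih =>
    intro k L h0 h1
    simp only [pvInnerA]
    by_cases hb : k + 1 > cap
    · have hk : k = cap := by omega
      have hz : (cap - k).toNat = 0 := by omega
      simp [hz, hk]
    · rw [if_neg hb]
      rw [ih (k + 1) (L ++ [(PySem.Int.toStr r ++ c, r, c)]) (by omega) (by omega)]
      have ht : (cap - k).toNat = (cap - (k + 1)).toNat + 1 := by omega
      rw [ht]
      simp [List.take_succ_cons, pvEnt]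
      split_ifs <;> omega

theorem pvRowExt (colsL : List String) (hn : colsL ≠ []) (t d : Nat) :
    (colsL.take d).map (fun c => pvEnt ((t : Int) + 1) c)
      = (List.range (min d colsL.length)).map (fun j => pvG colsL (t * colsL.length + j)) := by
  have hlen : 0 < colsL.length := List.length_pos_iff.mpr hn
  apply List.ext_getElem
  · simp
  · intro j h1 h2
    simp only [List.getElem_map, List.getElem_take, List.getElem_range]
    have hj : j < colsL.length := by
      simp only [List.length_map, List.length_take] at h1; omega
    have hdiv : (t * colsL.length + j) / colsL.length = t := by
      rw [Nat.mul_comm t, Nat.mul_add_div hlen, Nat.div_eq_of_lt hj]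
      omega
    have hmod : (t * colsL.length + j) % colsL.length = j := by
      rw [Nat.mul_comm t, Nat.mul_add_mod]
      exact Nat.mod_eq_of_lt hj
    simp [pvG, hdiv, hmod, List.getD_eq_getElem?_getD, List.getElem?_eq_getElem hj]

theorem pvAltLoop_spec (taken : PySem.Set String) (colsL : List String) (pref : String)
    (hn : colsL ≠ []) : ∀ (l : List Nat) (fa : Option String),
    pvAltLoop taken colsL pref (l.map Int.ofNat) fa
      = pvPick ((((l.map (pvG colsL)).filter (pvP1 taken pref)).map (fun s => s.1)).head?) fa
               ((((l.map (pvG colsL)).filter (pvP2 taken)).map (fun s => s.1)).head?) := by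
  intro l
  induction l with
  | nil => intro fa; cases fa <;> simp [pvAltLoop, pvPick]
  | cons k rest ih =>
    intro fa
    have hlen : 0 < colsL.length := List.length_pos_iff.mpr hn
    have hc : (PySem.List.pyGet? colsL ((((k % colsL.length : Nat)) : Int))).getD ""
        = colsL.getD (k % colsL.length) "" := by
      rw [PySem.List.pyGet?_natCast]
      rw [List.getD_eq_getElem?_getD]
    rw [List.map_cons]
    have hstep : ∀ (i : Int) (rs : List Int) (fa0 : Option String), pvAltLoop taken colsL pref (i :: rs) fa0 =
        (let r := PySem.Int.floordiv i (colsL.length : Int)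
         let j := PySem.Int.mod i (colsL.length : Int)
         let c := (PySem.List.pyGet? colsL j).getD ""
         let lab := PySem.Int.toStr (r + 1) ++ c
         if taken.contains lab then pvAltLoop taken colsL pref rs fa0
         else
           let fa := match fa0 with | none => some lab | some x => some x
           let t := if c == "A" || c == "F" then "window" else if c == "C" || c == "D" then "aisle" else "middle"
           if pref == "any" || t == pref then some lab
           else pvAltLoop taken colsL pref rs fa) := fun _ _ _ => rfl
    rw [hstep]
    simp only [Int.ofNat_eq_natCast, PySem.Int.floordiv_natCast, PySem.Int.mod_natCast, hc]
    set c := colsL.getD (k % colsL.length) "" with hcdef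
    have hg1 : (pvG colsL k).1 = PySem.Int.toStr (((k / colsL.length : Nat) : Int) + 1) ++ c := rfl
    have hg22 : (pvG colsL k).2.2 = c := rfl
    rw [← hg1]
    have hst : (if c == "A" || c == "F" then "window" else if c == "C" || c == "D" then "aisle" else "middle") = pvSeatType (pvG colsL k).2.2 := by
      rw [hg22, pvSeatType]
    rw [hst]
    cases htk : taken.contains (pvG colsL k).1 with
    | true =>
      rw [if_pos rfl]
      rw [ih fa]
      have h1 : pvP1 taken pref (pvG colsL k) = false := by
        simp only [pvP1, htk, Bool.not_true, Bool.false_and]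
      have h2 : pvP2 taken (pvG colsL k) = false := by
        simp only [pvP2, htk, Bool.not_true]
      simp only [List.map_cons, List.filter_cons, h1, h2, Bool.false_eq_true, if_false]
    | false =>
      rw [if_neg (by simp)]
      cases hm : (pref == "any" || pvSeatType (pvG colsL k).2.2 == pref) with
      | true =>
        rw [if_pos rfl]
        have h1 : pvP1 taken pref (pvG colsL k) = true := by
          simp only [pvP1, htk, hm, Bool.not_false, Bool.true_and]
        simp only [List.map_cons, List.filter_cons, h1, if_true, List.head?_cons]
        rfl
      | false =>
        rw [if_neg (by simp)]
        have h1 : pvP1 taken pref (pvG colsL k) = false := by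
          simp only [pvP1, hm, Bool.and_false]
        have h2 : pvP2 taken (pvG colsL k) = true := by
          simp only [pvP2, htk, Bool.not_false]
        rw [ih]
        simp only [List.map_cons, List.filter_cons, h1, h2, Bool.false_eq_true, if_false, if_true, List.map_cons, List.head?_cons]
        cases fa with
        | none =>
          cases hh : (((rest.map (pvG colsL)).filter (pvP1 taken pref)).map (fun s => s.1)).head? <;>
            simp [pvPick, hh]
        | some x =>
          cases hh : (((rest.map (pvG colsL)).filter (pvP1 taken pref)).map (fun s => s.1)).head? <;>
            simp [pvPick, hh]

theorem pvOuter_spec (cap : Int) (hcap : 0 < cap) (colsL : List String) (hn : colsL ≠ []) :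
    ∀ t : Nat, t ≤ (cap.toNat - 1) / colsL.length + 1 →
    (PySem.List.pyRange 1 ((t : Int) + 1) 1).foldl (fun st r => pvInnerA cap r colsL st) (0, [])
      = ((if ((t * colsL.length : Nat) : Int) ≤ cap then ((t * colsL.length : Nat) : Int) else cap + 1),
         (List.range (min (t * colsL.length) cap.toNat)).map (pvG colsL)) := by
  have hlen : 0 < colsL.length := List.length_pos_iff.mpr hn
  intro t
  induction t with
  | zero =>
    intro _
    have h1 : ((0 : Nat) : Int) + 1 = 1 := by norm_num
    rw [h1, PySem.List.pyRange_one_eq_nil (by omega)]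
    simp [hcap.le]
  | succ t ih =>
    intro ht
    have ht' : t ≤ (cap.toNat - 1) / colsL.length := by omega
    have htn : t * colsL.length ≤ cap.toNat - 1 := (Nat.le_div_iff_mul_le hlen).mp ht'
    have hcapN : 1 ≤ cap.toNat := by omega
    have htn' : t * colsL.length < cap.toNat := by omega
    have hcapInt : cap = (cap.toNat : Int) := by omega
    have hrange : PySem.List.pyRange 1 (((t+1 : Nat) : Int) + 1) 1
        = PySem.List.pyRange 1 ((t : Int) + 1) 1 ++ [(t : Int) + 1] := by
      have h := PySem.List.pyRange_one_succ_right (a := 1) (b := (t : Int) + 1) (by omega)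
      convert h using 2 <;> push_cast <;> ring
    rw [hrange, List.foldl_append, ih (by omega)]
    have hle : ((t * colsL.length : Nat) : Int) ≤ cap := by
      rw [hcapInt]; exact_mod_cast htn'.le
    rw [if_pos hle]
    have hmin : min (t * colsL.length) cap.toNat = t * colsL.length := by omega
    rw [hmin]
    simp only [List.foldl_cons, List.foldl_nil]
    rw [pvInnerA_spec cap ((t : Int) + 1) colsL ((t * colsL.length : Nat) : Int) _ (by positivity) hle]
    have hd : (cap - ((t * colsL.length : Nat) : Int)).toNat = cap.toNat - t * colsL.length := by omega
    rw [hd, pvRowExt colsL hn t _]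
    have hsum : t * colsL.length + min (cap.toNat - t * colsL.length) colsL.length
        = min ((t+1) * colsL.length) cap.toNat := by
      have h2 : (t+1) * colsL.length = t * colsL.length + colsL.length := by ring
      rw [h2]; omega
    refine Prod.ext ?_ ?_
    · show (if ((t * colsL.length : Nat) : Int) + ((colsL.length : Nat) : Int) ≤ cap then _ else cap + 1) = _
      have h2 : ((t+1) * colsL.length : Nat) = t * colsL.length + colsL.length := by ring
      split_ifs with hA hB hB <;> push_cast [h2] at * <;> omega
    · show (List.range (t * colsL.length)).map (pvG colsL) ++
          (List.range (min (cap.toNat - t * colsL.length) colsL.length)).map (fun j => pvG colsL (t * colsL.length + j))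
          = (List.range (min ((t+1) * colsL.length) cap.toNat)).map (pvG colsL)
      rw [← hsum, List.range_add, List.map_append, List.map_map]
      rfl

-- ===== VERDICT (by name: the statement is the Claim_ definition above) =====
theorem autoassign_seat_from_capacity_spec : Claim_equal_autoassign_seat_from_capacity := by
  unfold Claim_equal_autoassign_seat_from_capacity
  intro capacity es bs preference cols hdom hpre
  unfold Spec_autoassign_seat_from_capacity
  by_cases hcap : capacity ≤ 0
  · simp only [autoassign_seat_from_capacity, autoassign_seat_from_capacity_alt]
    rw [if_pos hcap, if_pos hcap]
  · have hcap' : 0 < capacity := by omega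
    have hpre' : cols ≠ some ([] : List String) := hpre.resolve_left hcap
    have hnc : cols.getD ["A", "B", "C", "D", "E", "F"] ≠ [] := by
      rcases cols with _ | l
      · simp
      · simp only [Option.getD_some]
        intro h
        exact hpre' (by rw [h])
    set colsL := cols.getD ["A", "B", "C", "D", "E", "F"] with hcols
    rcases es with _ | els
    all_goals simp only [autoassign_seat_from_capacity, autoassign_seat_from_capacity_alt]
    all_goals rw [if_neg hcap, if_neg hcap]
    · rw [show PySem.Set.ofList (((none : Option (List String)).getD []).filter (fun s => !(s == ""))) = PySem.Set.empty from rfl]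
      set exS := (PySem.Set.empty : PySem.Set String) with hexS
      have hlen : 0 < colsL.length := List.length_pos_iff.mpr hnc
      set blS := PySem.Set.ofList ((bs.getD []).filter (fun s => !(s == ""))) with hblS
      set taken := PySem.Set.union exS blS with htaken
      set pref := PySem.Str.lower (if preference == "" then "any" else preference) with hpref
      have hcapInt : capacity = (capacity.toNat : Int) := by omega
      have hrows : PySem.Int.floordiv (capacity + (colsL.length : Int) - 1) (colsL.length : Int)
          = (((capacity.toNat - 1) / colsL.length + 1 : Nat) : Int) := by
        have h1 : capacity + (colsL.length : Int) - 1 = (((capacity.toNat - 1) + colsL.length : Nat) : Int) := by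
          push_cast; omega
        rw [h1, PySem.Int.floordiv_natCast]
        congr 1
        rw [Nat.add_div_right _ hlen]
      rw [hrows]
      rw [pvOuter_spec capacity hcap' colsL hnc _ (le_refl _)]
      have hminr : min (((capacity.toNat - 1) / colsL.length + 1) * colsL.length) capacity.toNat = capacity.toNat := by
        have h3 := Nat.div_add_mod (capacity.toNat - 1) colsL.length
        have h4 := Nat.mod_lt (capacity.toNat - 1) hlen
        have h5 : ((capacity.toNat - 1) / colsL.length + 1) * colsL.length
            = colsL.length * ((capacity.toNat - 1) / colsL.length) + colsL.length := by ring
        omega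
      rw [hminr]
      have hlist : PySem.List.pyRange 0 capacity 1 = (List.range capacity.toNat).map Int.ofNat := by
        rw [PySem.List.pyRange_one]; simp
      rw [hlist, pvAltLoop_spec taken colsL pref hnc]
      have hpred1 : ∀ s : String × Int × String,
          (!(exS.contains s.1) && !(blS.contains s.1) && (pref == "any" || pvSeatType s.2.2 == pref))
            = pvP1 taken pref s := by
        intro s
        simp only [pvP1, htaken, pvContains_union]
        cases exS.contains s.1 <;> cases blS.contains s.1 <;> simp
      have hpred2 : ∀ s : String × Int × String,
          (!(exS.contains s.1) && !(blS.contains s.1)) = pvP2 taken s := by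
        intro s
        simp only [pvP2, htaken, pvContains_union]
        cases exS.contains s.1 <;> cases blS.contains s.1 <;> simp
      simp only [hpred1]
      simp only [hpred2]
      cases h1 : ((((List.range capacity.toNat).map (pvG colsL)).filter (pvP1 taken pref)).map (fun s => s.1)) with
      | nil =>
        cases h2 : ((((List.range capacity.toNat).map (pvG colsL)).filter (pvP2 taken)).map (fun s => s.1)) <;>
          simp [pvPick, h1, h2]
      | cons x xs =>
        simp [pvPick, h1]
    · rw [show PySem.Set.ofList (((some els : Option (List String)).getD []).filter (fun s => !(s == ""))) = PySem.Set.ofList (els.filter (fun s => !(s == ""))) from rfl]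
      set exS := PySem.Set.ofList (els.filter (fun s => !(s == ""))) with hexS
      have hlen : 0 < colsL.length := List.length_pos_iff.mpr hnc
      set blS := PySem.Set.ofList ((bs.getD []).filter (fun s => !(s == ""))) with hblS
      set taken := PySem.Set.union exS blS with htaken
      set pref := PySem.Str.lower (if preference == "" then "any" else preference) with hpref
      have hcapInt : capacity = (capacity.toNat : Int) := by omega
      have hrows : PySem.Int.floordiv (capacity + (colsL.length : Int) - 1) (colsL.length : Int)
          = (((capacity.toNat - 1) / colsL.length + 1 : Nat) : Int) := by
        have h1 : capacity + (colsL.length : Int) - 1 = (((capacity.toNat - 1) + colsL.length : Nat) : Int) := by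
          push_cast; omega
        rw [h1, PySem.Int.floordiv_natCast]
        congr 1
        rw [Nat.add_div_right _ hlen]
      rw [hrows]
      rw [pvOuter_spec capacity hcap' colsL hnc _ (le_refl _)]
      have hminr : min (((capacity.toNat - 1) / colsL.length + 1) * colsL.length) capacity.toNat = capacity.toNat := by
        have h3 := Nat.div_add_mod (capacity.toNat - 1) colsL.length
        have h4 := Nat.mod_lt (capacity.toNat - 1) hlen
        have h5 : ((capacity.toNat - 1) / colsL.length + 1) * colsL.length
            = colsL.length * ((capacity.toNat - 1) / colsL.length) + colsL.length := by ring
        omega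
      rw [hminr]
      have hlist : PySem.List.pyRange 0 capacity 1 = (List.range capacity.toNat).map Int.ofNat := by
        rw [PySem.List.pyRange_one]; simp
      rw [hlist, pvAltLoop_spec taken colsL pref hnc]
      have hpred1 : ∀ s : String × Int × String,
          (!(exS.contains s.1) && !(blS.contains s.1) && (pref == "any" || pvSeatType s.2.2 == pref))
            = pvP1 taken pref s := by
        intro s
        simp only [pvP1, htaken, pvContains_union]
        cases exS.contains s.1 <;> cases blS.contains s.1 <;> simp
      have hpred2 : ∀ s : String × Int × String,
          (!(exS.contains s.1) && !(blS.contains s.1)) = pvP2 taken s := by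
        intro s
        simp only [pvP2, htaken, pvContains_union]
        cases exS.contains s.1 <;> cases blS.contains s.1 <;> simp
      simp only [hpred1]
      simp only [hpred2]
      cases h1 : ((((List.range capacity.toNat).map (pvG colsL)).filter (pvP1 taken pref)).map (fun s => s.1)) with
      | nil =>
        cases h2 : ((((List.range capacity.toNat).map (pvG colsL)).filter (pvP2 taken)).map (fun s => s.1)) <;>
          simp [pvPick, h1, h2]
      | cons x xs =>
        simp [pvPick, h1]
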